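-- pv_equiv track=rewrite | github.com/geschnee/acg-gruppe6 | recognition_pipeline.py | number_cooptimal_sol
-- ===== SOURCE A (Python) =====
-- import copy
--
-- def number_cooptimal_sol(all_green_paths):
--     # cooptimal solutions are paths were the node order is different from the simulation ones
--     paths_out_of_order_count = 0
--     for path in all_green_paths:
--         normal_seq = [[0, 1, 2, 3]]
--         for index in range(1, len(path)):
--             save = copy.deepcopy(normal_seq[index - 1])
--             save.append(index + 3)
--             normal_seq.append(save)
--         node_order = []
--         for step in path:
--             node_order.append(step["V"])
--         if not normal_seq == node_order:
--             paths_out_of_order_count += 1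
--     return paths_out_of_order_count
-- ===== SOURCE B (Python) =====
-- def number_cooptimal_sol(all_green_paths):
--     # Alternative: a path is "in order" iff its first step's V is [0,1,2,3] and
--     # each later step's V is the previous step's V with one node (i+4) appended;
--     # this differential adjacent-pair check never builds the expected lists.
--     count = 0
--     for path in all_green_paths:
--         vs = [step["V"] for step in path]
--         ok = bool(vs) and vs[0] == [0, 1, 2, 3] and all(
--             b == a + [i + 4] for i, (a, b) in enumerate(zip(vs, vs[1:])))
--         if not ok:
--             count += 1
--     return count
-- ===== Notes on version B (the rewrite author's own statement) =====
-- stated objective: alternative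
-- what changed: B replaces A's deepcopy-built list of expected prefixes and the whole-structure == by a differential check: the first step's V must be [0,1,2,3] and each later step's V must equal the previous step's V with one node appended, so no expected lists are ever constructed.
import Mathlib
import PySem

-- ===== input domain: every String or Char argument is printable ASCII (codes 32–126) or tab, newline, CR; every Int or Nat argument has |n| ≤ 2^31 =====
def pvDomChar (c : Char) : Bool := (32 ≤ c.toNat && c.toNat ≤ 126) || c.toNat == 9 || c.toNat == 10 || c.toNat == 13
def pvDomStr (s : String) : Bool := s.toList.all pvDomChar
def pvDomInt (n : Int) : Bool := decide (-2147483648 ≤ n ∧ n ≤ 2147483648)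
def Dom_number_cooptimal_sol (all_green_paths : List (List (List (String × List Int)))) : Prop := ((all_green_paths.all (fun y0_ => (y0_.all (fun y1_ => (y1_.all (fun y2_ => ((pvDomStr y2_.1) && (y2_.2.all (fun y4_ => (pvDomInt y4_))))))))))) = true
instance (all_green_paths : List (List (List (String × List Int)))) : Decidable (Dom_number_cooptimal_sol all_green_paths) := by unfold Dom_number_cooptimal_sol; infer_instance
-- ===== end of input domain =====

-- B replaces A's deepcopy-built list of expected prefixes by a differential
-- adjacent-pair check (first V is [0,1,2,3], each later V extends the previous
-- one by a single node); objective: alternative.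

-- ===== PORT A =====
def number_cooptimal_sol (all_green_paths : List (List (List (String × List Int)))) : Int :=
  all_green_paths.foldl (fun paths_out_of_order_count path =>
    let normal_seq : List (List Int) :=
      (PySem.List.pyRange 1 (path.length : Int) 1).foldl
        (fun ns index =>
          let save := PySem.List.pyGetD ns (index - 1) []
          ns ++ [save ++ [index + 3]])
        [[0, 1, 2, 3]]
    let node_order : List (List Int) :=
      path.foldl (fun acc step => acc ++ [(step.lookup "V").getD []]) []
    if !(normal_seq == node_order) then paths_out_of_order_count + 1
    else paths_out_of_order_count) 0

-- ===== PORT B =====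
def number_cooptimal_sol_alt (all_green_paths : List (List (List (String × List Int)))) : Int :=
  all_green_paths.foldl (fun count path =>
    let vs : List (List Int) := path.map (fun step => (step.lookup "V").getD [])
    -- vs[0] is guarded by bool(vs) in Source B, so headD's default is never used
    let ok : Bool :=
      !vs.isEmpty && (vs.headD [] == [0, 1, 2, 3]) &&
        (PySem.List.enumerate (vs.zip vs.tail) 0).all
          (fun iab => iab.2.2 == iab.2.1 ++ [iab.1 + 4])
    if !ok then count + 1 else count) 0

-- ===== PRECONDITION & SPEC =====
-- Pre_ excludes exactly the inputs where some step dict lacks the key "V":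
-- there Python A raises KeyError (and so does B).
def Pre_number_cooptimal_sol (all_green_paths : List (List (List (String × List Int)))) : Prop :=
  ∀ path ∈ all_green_paths, ∀ step ∈ path, (step.lookup "V").isSome = true
instance (all_green_paths : List (List (List (String × List Int)))) : Decidable (Pre_number_cooptimal_sol all_green_paths) := by unfold Pre_number_cooptimal_sol; infer_instance

def pvWitness_number_cooptimal_sol : (List (List (List (String × List Int)))) :=
  [[[("V", [0, 1, 2, 3])], [("V", [0, 1, 2, 3, 4])]], []]

def Spec_number_cooptimal_sol (all_green_paths : List (List (List (String × List Int)))) (out : Int) : Prop := out = number_cooptimal_sol_alt all_green_paths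
instance (all_green_paths : List (List (List (String × List Int)))) (out : Int) : Decidable (Spec_number_cooptimal_sol all_green_paths out) := by unfold Spec_number_cooptimal_sol; infer_instance

-- ===== CLAIM (what is proved, stated in full; the proofs are below) =====
def Claim_equal_number_cooptimal_sol : Prop := ∀ (all_green_paths : List (List (List (String × List Int)))), Dom_number_cooptimal_sol all_green_paths → Pre_number_cooptimal_sol all_green_paths → Spec_number_cooptimal_sol all_green_paths (number_cooptimal_sol all_green_paths)

-- ===== LEMMAS AND PROOFS =====

-- the expected node list of step i: list(range(i + 4))
def pvR (i : Int) : List Int := PySem.List.pyRange 0 (i + 4) 1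

lemma pvR_succ (i : Int) (h : 0 ≤ i) : pvR i ++ [i + 4] = pvR (i + 1) := by
  unfold pvR
  rw [show i + 1 + 4 = (i + 4) + 1 by ring,
      PySem.List.pyRange_one_succ_right (by omega)]

-- A's normal_seq loop builds exactly [range(4), range(5), …] of length max 1 n
lemma pvNormalSeq (n : Nat) :
    (PySem.List.pyRange 1 (n : Int) 1).foldl
        (fun ns index =>
          let save := PySem.List.pyGetD ns (index - 1) []
          ns ++ [save ++ [index + 3]])
        [[0, 1, 2, 3]]
      = (List.range (Nat.max 1 n)).map (fun (i : Nat) => pvR (i : Int)) := by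
  induction n with
  | zero =>
    rw [PySem.List.pyRange_one_eq_nil (by norm_num)]
    decide
  | succ n ih =>
    rcases Nat.eq_zero_or_pos n with h | h
    · subst h
      rw [PySem.List.pyRange_one_eq_nil (by norm_num)]
      decide
    · have h1 : (1:Int) ≤ (n:Int) := by exact_mod_cast h
      rw [Nat.cast_add_one, PySem.List.pyRange_one_succ_right h1, List.foldl_append, ih]
      have m1 : Nat.max 1 n = n := Nat.max_eq_right h
      have m2 : Nat.max 1 (n+1) = n+1 := Nat.max_eq_right (by omega)
      rw [m1, m2]
      simp only [List.foldl_cons, List.foldl_nil]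
      have hget : PySem.List.pyGetD ((List.range n).map (fun (i : Nat) => pvR (i : Int))) ((n:Int) - 1) []
          = pvR ((n:Int) - 1) := by
        have e : ((n:Int) - 1) = ((n-1 : Nat) : Int) := by omega
        rw [e, PySem.List.pyGetD_natCast]
        rw [List.getD_eq_getElem?_getD, List.getElem?_map, List.getElem?_range (by omega)]
        simp only [Option.map_some, Option.getD_some]
      rw [hget]
      have htail : pvR ((n:Int) - 1) ++ [(n:Int) + 3] = pvR (n:Int) := by
        have := pvR_succ ((n:Int) - 1) (by omega)
        rw [show (n:Int) - 1 + 4 = (n:Int) + 3 by ring, show (n:Int) - 1 + 1 = (n:Int) by ring] at this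
        exact this
      rw [htail, List.range_succ, List.map_append]
      simp

-- "equals the expected prefixes" ↔ the differential adjacent-pair condition
lemma pvChain (vs : List (List Int)) (s : Nat) :
    ((List.range vs.length).map (fun (i : Nat) => pvR ((s : Int) + i)) = vs) ↔
      ((∀ h : vs ≠ [], vs.head h = pvR (s : Int)) ∧
       (∀ iab ∈ PySem.List.enumerate (vs.zip vs.tail) (s : Int),
          iab.2.2 = iab.2.1 ++ [iab.1 + 4])) := by
  induction vs generalizing s with
  | nil => simp [PySem.List.enumerate_nil]
  | cons v0 rest ih =>
    have hshift : ∀ rs : List (List Int),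
        (List.range rs.length).map (fun (i : Nat) => pvR ((s : Int) + (i + 1)))
          = (List.range rs.length).map (fun (i : Nat) => pvR (((s + 1 : Nat) : Int) + i)) := by
      intro rs
      apply List.map_congr_left
      intro a _
      congr 1
      push_cast
      ring
    rw [List.length_cons, List.range_succ_eq_map, List.map_cons, List.map_map]
    cases rest with
    | nil =>
      simp only [List.length_nil, List.range_zero, List.map_nil, List.tail_cons,
        List.zip_nil_right, PySem.List.enumerate_nil]
      constructor
      · intro h
        rw [List.cons_eq_cons] at h
        exact ⟨fun _ => by simp [h.1.symm], by simp⟩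
      · rintro ⟨hh, -⟩
        rw [List.cons_eq_cons]
        exact ⟨(hh (by simp)).symm ▸ by simp, rfl⟩
    | cons v1 rest' =>
      have ihs := ih (s + 1)
      have hcompshift : (List.range (v1 :: rest').length).map
            ((fun (i : Nat) => pvR ((s : Int) + i)) ∘ Nat.succ)
          = (List.range (v1 :: rest').length).map
            (fun (i : Nat) => pvR (((s + 1 : Nat) : Int) + i)) := by
        apply List.map_congr_left
        intro a _
        simp only [Function.comp, Nat.succ_eq_add_one]
        congr 1
        push_cast
        ring
      have hzip : (v0 :: v1 :: rest').zip (v0 :: v1 :: rest').tail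
          = (v0, v1) :: (v1 :: rest').zip (v1 :: rest').tail := by
        simp [List.zip_cons_cons]
      constructor
      · intro heq
        rw [List.cons_eq_cons] at heq
        obtain ⟨h0, h1⟩ := heq
        have hrest := ihs.mp (hcompshift ▸ h1)
        have hv1 : v1 = pvR ((s : Int) + 1) := by
          have := (hrest.1 (by simp)).symm
          simpa [Nat.cast_add] using this.symm
        refine ⟨fun _ => by simpa using h0.symm, ?_⟩
        intro iab hiab
        rw [hzip, PySem.List.enumerate_cons] at hiab
        rcases List.mem_cons.mp hiab with h | h
        · subst h
          simp only
          rw [hv1, ← pvR_succ (s : Int) (by positivity), ← h0]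
          norm_num
        · exact hrest.2 iab (by simpa [Nat.cast_add] using h)
      · rintro ⟨hhead, hpairs⟩
        have h0 : v0 = pvR (s : Int) := hhead (by simp)
        have h01 : v1 = v0 ++ [(s : Int) + 4] := by
          have := hpairs ((s : Int), (v0, v1))
            (by rw [hzip, PySem.List.enumerate_cons]; exact List.mem_cons_self)
          simpa using this
        have hv1 : v1 = pvR ((s : Int) + 1) := by
          rw [h01, h0]
          exact pvR_succ (s : Int) (by positivity)
        have htl : (List.range (v1 :: rest').length).map
            (fun (i : Nat) => pvR (((s + 1 : Nat) : Int) + i)) = v1 :: rest' := by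
          apply ihs.mpr
          refine ⟨fun _ => by simpa [Nat.cast_add] using hv1, ?_⟩
          intro iab hiab
          apply hpairs iab
          rw [hzip, PySem.List.enumerate_cons]
          exact List.mem_cons_of_mem _ (by simpa [Nat.cast_add] using hiab)
        rw [List.cons_eq_cons]
        exact ⟨h0.symm, hcompshift ▸ htl⟩

-- per-path agreement of A's fold body with B's fold body
lemma pvStep (c : Int) (path : List (List (String × List Int))) :
    (let normal_seq : List (List Int) :=
      (PySem.List.pyRange 1 (path.length : Int) 1).foldl
        (fun ns index =>
          let save := PySem.List.pyGetD ns (index - 1) []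
          ns ++ [save ++ [index + 3]])
        [[0, 1, 2, 3]]
     let node_order : List (List Int) :=
      path.foldl (fun acc step => acc ++ [(step.lookup "V").getD []]) []
     if !(normal_seq == node_order) then c + 1 else c)
    = (let vs : List (List Int) := path.map (fun step => (step.lookup "V").getD [])
       let ok : Bool :=
        !vs.isEmpty && (vs.headD [] == [0, 1, 2, 3]) &&
          (PySem.List.enumerate (vs.zip vs.tail) 0).all
            (fun iab => iab.2.2 == iab.2.1 ++ [iab.1 + 4])
       if !ok then c + 1 else c) := by
  cases path with
  | nil =>
    simp [PySem.List.enumerate_nil]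
  | cons p0 rest =>
    simp only
    rw [PySem.List.foldl_append_singleton_eq_map, pvNormalSeq, List.nil_append]
    set vs : List (List Int) := (p0 :: rest).map (fun step => (step.lookup "V").getD []) with hvs
    have hlen : vs.length = rest.length + 1 := by simp [hvs]
    have m1 : Nat.max 1 (p0 :: rest).length = vs.length := by
      rw [hlen]; simp
    rw [m1]
    have hemp : vs.isEmpty = false := by
      rw [hvs]; simp
    have hne : vs ≠ [] := by
      rw [hvs]; simp
    have hcond : ((List.range vs.length).map (fun (i : Nat) => pvR (i : Int)) == vs)
        = (!vs.isEmpty && (vs.headD [] == [0, 1, 2, 3]) &&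
            (PySem.List.enumerate (vs.zip vs.tail) 0).all
              (fun iab => iab.2.2 == iab.2.1 ++ [iab.1 + 4])) := by
      rw [hemp]
      simp only [Bool.not_false, Bool.true_and]
      rw [Bool.eq_iff_iff, beq_iff_eq]
      have hch := pvChain vs 0
      simp only [Nat.cast_zero, zero_add] at hch
      rw [hch]
      have hR0 : pvR 0 = [0, 1, 2, 3] := by decide
      constructor
      · rintro ⟨hh, hp⟩
        rw [Bool.and_eq_true, beq_iff_eq, List.all_eq_true]
        refine ⟨?_, ?_⟩
        · rw [List.headD_eq_head?, List.head?_eq_head hne, Option.getD_some, hh hne, hR0]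
        · intro iab hiab
          rw [beq_iff_eq]
          exact hp iab hiab
      · intro hb
        rw [Bool.and_eq_true, beq_iff_eq, List.all_eq_true] at hb
        refine ⟨?_, ?_⟩
        · intro h
          rw [List.headD_eq_head?, List.head?_eq_head hne, Option.getD_some] at hb
          rw [hb.1, hR0]
        · intro iab hiab
          have := hb.2 iab hiab
          rwa [beq_iff_eq] at this
    rw [hcond]

-- the two folds agree for every accumulator
lemma pvFold (ps : List (List (List (String × List Int)))) (c : Int) :
    ps.foldl (fun paths_out_of_order_count path =>
      let normal_seq : List (List Int) :=
        (PySem.List.pyRange 1 (path.length : Int) 1).foldl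
          (fun ns index =>
            let save := PySem.List.pyGetD ns (index - 1) []
            ns ++ [save ++ [index + 3]])
          [[0, 1, 2, 3]]
      let node_order : List (List Int) :=
        path.foldl (fun acc step => acc ++ [(step.lookup "V").getD []]) []
      if !(normal_seq == node_order) then paths_out_of_order_count + 1
      else paths_out_of_order_count) c
    = ps.foldl (fun count path =>
        let vs : List (List Int) := path.map (fun step => (step.lookup "V").getD [])
        let ok : Bool :=
          !vs.isEmpty && (vs.headD [] == [0, 1, 2, 3]) &&
            (PySem.List.enumerate (vs.zip vs.tail) 0).all
              (fun iab => iab.2.2 == iab.2.1 ++ [iab.1 + 4])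
        if !ok then count + 1 else count) c := by
  induction ps generalizing c with
  | nil => rfl
  | cons p ps ih =>
    simp only [List.foldl_cons]
    rw [pvStep c p]
    exact ih _

-- ===== VERDICT (by name: the statement is the Claim_ definition above) =====
theorem number_cooptimal_sol_spec : Claim_equal_number_cooptimal_sol := by
  intro ps hdom hpre
  unfold Spec_number_cooptimal_sol number_cooptimal_sol number_cooptimal_sol_alt
  exact pvFold ps 0
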